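-- pv_equiv track=rewrite | github.com/jjackson1994/Thesis_Normalizing_Flows_for_Binary_Black_Holes | nf_tools.py | get_search_labels
-- ===== SOURCE A (Python) =====
-- def get_search_labels(params):
--     from itertools import product
--     labels = []
--     keys, values = zip(*params.items())
--     combinations = [dict(zip(keys, p)) for p in product(*values)]
--     for run in combinations:
--         labels.append("_".join([k+ '_'+ str(run[k])for k in run]))
--     return labels
-- ===== SOURCE B (Python) =====
-- def get_search_labels(params):
--     keys, values = zip(*params.items())
--     acc = [""]
--     first = True
--     for k, vs in zip(keys, values):
--         sep = "" if first else "_"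
--         acc = [p + sep + k + "_" + str(v) for p in acc for v in vs]
--         first = False
--     return acc
-- ===== Notes on version B (the rewrite author's own statement) =====
-- stated objective: alternative
-- what changed: Replaces itertools.product plus a per-combination dict and join with a single accumulator of partial label strings that is extended key by key, so no intermediate tuples, dicts or join pass exist.
import Mathlib
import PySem

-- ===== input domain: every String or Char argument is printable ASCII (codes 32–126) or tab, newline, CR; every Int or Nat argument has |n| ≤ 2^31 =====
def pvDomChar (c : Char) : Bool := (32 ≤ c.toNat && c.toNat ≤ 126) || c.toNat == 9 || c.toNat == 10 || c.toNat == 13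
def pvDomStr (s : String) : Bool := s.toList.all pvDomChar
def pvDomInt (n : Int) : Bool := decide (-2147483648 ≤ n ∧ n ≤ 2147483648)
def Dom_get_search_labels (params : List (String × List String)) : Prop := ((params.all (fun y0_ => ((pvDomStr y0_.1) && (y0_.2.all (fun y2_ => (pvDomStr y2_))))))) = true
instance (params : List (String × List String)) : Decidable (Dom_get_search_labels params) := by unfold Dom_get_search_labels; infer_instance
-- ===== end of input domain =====

-- B replaces itertools.product + per-combination dicts + join by one accumulator of
-- partial label strings extended key by key (objective: alternative decomposition).

-- ===== PORT A =====
-- itertools.product(*values), leftmost factor slowest (Python's order)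
def pyProduct : List (List String) → List (List String)
  | [] => [[]]
  | vs :: rest => vs.flatMap (fun v => (pyProduct rest).map (fun p => v :: p))

-- run[k] always succeeds (k ranges over run's own keys), so getD is exact here
def get_search_labels (params : List (String × List String)) : List String :=
  let keys := params.map Prod.fst
  let values := params.map Prod.snd
  let combinations := (pyProduct values).map (fun p => PySem.Dict.ofList (keys.zip p))
  combinations.foldl
    (fun labels run =>
      labels ++ [PySem.Str.join "_" (run.keys.map (fun k => k ++ "_" ++ run.getD k ""))]) []

-- ===== PORT B =====
def altExtend (k : String) (vs : List String) (sep : String) (acc : List String) : List String :=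
  acc.flatMap (fun p => vs.map (fun v => p ++ sep ++ k ++ "_" ++ v))

def altLoop : List (String × List String) → List String → Bool → List String
  | [], acc, _ => acc
  | (k, vs) :: rest, acc, first =>
      altLoop rest (altExtend k vs (if first then "" else "_") acc) false

def get_search_labels_alt (params : List (String × List String)) : List String :=
  let keys := params.map Prod.fst
  let values := params.map Prod.snd
  altLoop (keys.zip values) [""] true

-- ===== PRECONDITION & SPEC =====
-- Pre_ excludes the empty dict (zip(*params.items()) raises ValueError in both A and B)
-- and association lists with duplicate keys, which have no faithful Python-dict
-- counterpart (dict() collapses duplicates, so the list no longer represents the input).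
def Pre_get_search_labels (params : List (String × List String)) : Prop :=
  params ≠ [] ∧ (params.map Prod.fst).Nodup
instance (params : List (String × List String)) : Decidable (Pre_get_search_labels params) := by
  unfold Pre_get_search_labels; infer_instance

def pvWitness_get_search_labels : (List (String × List String)) :=
  [("a", ["1", "2"]), ("b", ["x"])]

def Spec_get_search_labels (params : List (String × List String)) (out : List String) : Prop :=
  out = get_search_labels_alt params
instance (params : List (String × List String)) (out : List String) :
    Decidable (Spec_get_search_labels params out) := by unfold Spec_get_search_labels; infer_instance

-- ===== CLAIM (what is proved, stated in full; the proofs are below) =====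
def Claim_equal_get_search_labels : Prop :=
  ∀ (params : List (String × List String)), Dom_get_search_labels params →
    Pre_get_search_labels params →
    Spec_get_search_labels params (get_search_labels params)

-- ===== LEMMAS AND PROOFS =====

-- tail of a joined label: "_k1_v1_k2_v2…"
def pvT : List (String × String) → String
  | [] => ""
  | kv :: rest => "_" ++ (kv.1 ++ "_" ++ kv.2) ++ pvT rest

theorem pv_str_ext {s t : String} (h : s.toList = t.toList) : s = t :=
  String.toList_inj.mp h

theorem pv_join_cons (x y : String) (l : List String) :
    PySem.Str.join "_" (x :: y :: l) = x ++ "_" ++ PySem.Str.join "_" (y :: l) := by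
  apply pv_str_ext
  simp [PySem.Str.toList_join, PySem.Chars.join_cons_cons]

theorem pv_join_pieces (k v : String) (l : List (String × String)) :
    PySem.Str.join "_" (((k, v) :: l).map (fun kv => kv.1 ++ "_" ++ kv.2))
      = (k ++ "_" ++ v) ++ pvT l := by
  induction l generalizing k v with
  | nil =>
      apply pv_str_ext
      simp [PySem.Str.toList_join, PySem.Chars.join_singleton, pvT]
  | cons kv rest ih =>
      have h := pv_join_cons (k ++ "_" ++ v) (kv.1 ++ "_" ++ kv.2)
        (rest.map (fun kv => kv.1 ++ "_" ++ kv.2))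
      simp only [List.map_cons] at h ⊢
      rw [h]
      have h2 := ih kv.1 kv.2
      simp only [List.map_cons] at h2
      rw [h2, pvT]
      apply pv_str_ext
      simp [String.append_assoc]

theorem pv_foldl_append_map {α β : Type} (g : α → β) (l : List α) (acc : List β) :
    l.foldl (fun labels run => labels ++ [g run]) acc = acc ++ l.map g := by
  induction l generalizing acc with
  | nil => simp
  | cons x xs ih => simp [ih, List.append_assoc]

theorem pv_pyProduct_length {p : List String} {vs : List (List String)}
    (h : p ∈ pyProduct vs) : p.length = vs.length := by
  induction vs generalizing p with
  | nil => simp [pyProduct] at h; simp [h]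
  | cons v rest ih =>
      simp [pyProduct] at h
      obtain ⟨a, _, q, hq, rfl⟩ := h
      simp [ih hq]

theorem pv_dict_items (keys : List String) (p : List String)
    (hnd : keys.Nodup) (hlen : p.length = keys.length) :
    (PySem.Dict.ofList (keys.zip p)).items = keys.zip p := by
  have hmap : (keys.zip p).map Prod.fst = keys :=
    List.map_fst_zip (by omega)
  have h := PySem.Dict.items_foldl_insert_fresh (l := keys.zip p)
      (k := Prod.fst) (v := Prod.snd) (d := PySem.Dict.empty)
      (by intro a _; simp [PySem.Dict.contains_empty]) (by rw [hmap]; exact hnd)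
  simpa [PySem.Dict.ofList, PySem.Dict.empty] using h

theorem pv_A_characterization (params : List (String × List String))
    (hnd : (params.map Prod.fst).Nodup) :
    get_search_labels params
      = (pyProduct (params.map Prod.snd)).map
          (fun p => PySem.Str.join "_"
            (((params.map Prod.fst).zip p).map (fun kv => kv.1 ++ "_" ++ kv.2))) := by
  unfold get_search_labels
  rw [pv_foldl_append_map, List.nil_append, List.map_map]
  apply List.map_congr_left
  intro p hp
  have hlen : p.length = (params.map Prod.fst).length := by
    have := pv_pyProduct_length hp; simpa using this
  have hitems := pv_dict_items (params.map Prod.fst) p hnd hlen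
  have hkeys : (PySem.Dict.ofList ((params.map Prod.fst).zip p)).keys
      = ((params.map Prod.fst).zip p).map Prod.fst := by
    simp [PySem.Dict.keys, hitems]
  simp only [Function.comp_apply, hkeys, List.map_map]
  congr 1
  apply List.map_congr_left
  intro kv hkv
  have hmem : (kv.1, kv.2) ∈ (PySem.Dict.ofList ((params.map Prod.fst).zip p)).items := by
    rw [hitems]; simpa using hkv
  have hknd : (PySem.Dict.ofList ((params.map Prod.fst).zip p)).keys.Nodup := by
    rw [hkeys, List.map_fst_zip (by omega)]; exact hnd
  simp only [Function.comp_apply]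
  rw [PySem.Dict.getD_of_mem_items _ hmem hknd]

theorem pv_altLoop_false (L : List (String × List String)) (acc : List String) :
    altLoop L acc false
      = acc.flatMap (fun pre =>
          (pyProduct (L.map Prod.snd)).map (fun p => pre ++ pvT ((L.map Prod.fst).zip p))) := by
  induction L generalizing acc with
  | nil => simp [altLoop, pyProduct, pvT]
  | cons kvs rest ih =>
      obtain ⟨k, vs⟩ := kvs
      show altLoop rest (altExtend k vs "_" acc) false = _
      rw [ih, altExtend, List.flatMap_assoc]
      congr 1
      funext pre
      rw [List.flatMap_map, List.map_cons, List.map_cons]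
      simp only [pyProduct]
      rw [List.map_flatMap]
      congr 1
      funext v
      rw [List.map_map]
      congr 1
      funext p
      simp [pvT, String.append_assoc]

-- ===== VERDICT (by name: the statement is the Claim_ definition above) =====
theorem get_search_labels_spec : Claim_equal_get_search_labels := by
  intro params _ hpre
  obtain ⟨hne, hnd⟩ := hpre
  unfold Spec_get_search_labels
  cases params with
  | nil => exact absurd rfl hne
  | cons kvs rest =>
      obtain ⟨k, vs⟩ := kvs
      rw [pv_A_characterization _ hnd]
      unfold get_search_labels_alt
      simp only [List.map_cons, List.zip_cons_cons, List.zip_map', Prod.mk.eta, List.map_id']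
      show _ = altLoop rest (altExtend k vs "" [""]) false
      rw [pv_altLoop_false, altExtend]
      simp only [List.flatMap_cons, List.flatMap_nil, List.append_nil, List.flatMap_map,
        List.map_flatMap, List.map_map, pyProduct]
      congr 1
      funext v
      congr 1
      funext p
      simp only [Function.comp_apply, List.zip_cons_cons]
      rw [pv_join_pieces]
      simp [String.append_assoc]
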